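-- pv_equiv track=rewrite | github.com/banool/binder | imposer.py | get_page_order
-- ===== SOURCE A (Python) =====
-- import math
--
-- def get_page_order(total_pages, signature_size):
--     pages_per_signature = signature_size * 4
--     signatures = int(math.ceil(float(total_pages) / pages_per_signature))
--
--     output = []
--
--     for signature_offset in range(0, total_pages, pages_per_signature):
--         top_pointer = signature_offset + pages_per_signature - 1
--         bottom_pointer = signature_offset
--
--         for i in range(0, signature_size):
--             output.append(top_pointer)
--             top_pointer -= 1
--             output.append(bottom_pointer)
--             bottom_pointer += 1
--             output.append(bottom_pointer)
--             bottom_pointer += 1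
--             output.append(top_pointer)
--             top_pointer -= 1
--
--     # Filter all page numbers over the total number.
--     return [x if x < total_pages else -1 for x in output]
-- ===== SOURCE B (Python) =====
-- def get_page_order(total_pages, signature_size):
--     P = signature_size * 4
--     # number of signatures by ceiling division (raises ZeroDivisionError for signature_size == 0, like A)
--     signatures = -(-total_pages // P)
--     if signature_size <= 0 or signatures <= 0:
--         return []
--     # one signature's page pattern, relative to its first page
--     pattern = []
--     for i in range(signature_size):
--         pattern += [P - 1 - 2 * i, 2 * i, 2 * i + 1, P - 2 - 2 * i]
--     output = []
--     for s in range(signatures):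
--         base = s * P
--         for p in pattern:
--             x = base + p
--             output.append(x if x < total_pages else -1)
--     return output
-- ===== Notes on version B (the rewrite author's own statement) =====
-- stated objective: alternative
-- what changed: Replaces the two-pointer mutable-state walk inside each signature by a precomputed per-signature pattern of relative page indices, iterates over signature numbers (count obtained by ceiling division) instead of offsets produced by a stepped range, and fuses the final over-limit filter into the emission loop instead of a second pass.
import Mathlib
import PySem

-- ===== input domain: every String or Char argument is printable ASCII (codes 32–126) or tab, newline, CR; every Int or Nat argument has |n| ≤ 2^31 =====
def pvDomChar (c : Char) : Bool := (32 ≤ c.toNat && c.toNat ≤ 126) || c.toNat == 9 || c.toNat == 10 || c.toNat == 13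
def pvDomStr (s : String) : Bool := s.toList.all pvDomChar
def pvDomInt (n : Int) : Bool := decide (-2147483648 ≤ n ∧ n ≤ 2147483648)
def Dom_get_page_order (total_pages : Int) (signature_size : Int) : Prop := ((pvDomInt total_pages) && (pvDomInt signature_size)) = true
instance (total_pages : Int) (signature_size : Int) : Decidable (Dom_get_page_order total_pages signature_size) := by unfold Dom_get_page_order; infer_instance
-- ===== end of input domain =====

-- B replaces A's two-pointer walk by a precomputed per-signature pattern, loops over signature
-- numbers obtained by ceiling division, and fuses the over-limit filter into emission (objective:
-- alternative decomposition, same cost).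

-- ===== PORT A =====
-- one iteration of A's inner `for i in range(0, signature_size)` body (four appends, two pointers)
def stepA (st : List Int × Int × Int) (_i : Int) : List Int × Int × Int :=
  let out := st.1
  let top_pointer := st.2.1
  let bottom_pointer := st.2.2
  let out := out ++ [top_pointer]
  let top_pointer := top_pointer - 1
  let out := out ++ [bottom_pointer]
  let bottom_pointer := bottom_pointer + 1
  let out := out ++ [bottom_pointer]
  let bottom_pointer := bottom_pointer + 1
  let out := out ++ [top_pointer]
  let top_pointer := top_pointer - 1
  (out, top_pointer, bottom_pointer)

def get_page_order (total_pages : Int) (signature_size : Int) : List Int :=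
  let pages_per_signature := signature_size * 4
  -- `signatures = int(math.ceil(float(total_pages) / pages_per_signature))`: unused by A; on Dom
  -- (|ints| ≤ 2^31) the float ceil is the exact integer ceiling; it raises ZeroDivisionError when
  -- signature_size = 0, which Pre_ excludes.
  let _signatures := -(PySem.Int.floordiv (-total_pages) pages_per_signature)
  let output :=
    (PySem.List.pyRange 0 total_pages pages_per_signature).foldl
      (fun out signature_offset =>
        ((PySem.List.pyRange 0 signature_size 1).foldl stepA
          (out, signature_offset + pages_per_signature - 1, signature_offset)).1)
      []
  output.map (fun x => if x < total_pages then x else -1)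

-- ===== PORT B =====
def get_page_order_alt (total_pages : Int) (signature_size : Int) : List Int :=
  let P := signature_size * 4
  -- signatures = -(-total_pages // P): ceiling division, raises ZeroDivisionError for P = 0 like A
  let signatures := -(PySem.Int.floordiv (-total_pages) P)
  if signature_size ≤ 0 ∨ signatures ≤ 0 then []
  else
    let pattern :=
      (PySem.List.pyRange 0 signature_size 1).foldl
        (fun acc i => acc ++ [P - 1 - 2 * i, 2 * i, 2 * i + 1, P - 2 - 2 * i]) []
    (PySem.List.pyRange 0 signatures 1).foldl
      (fun output s =>
        pattern.foldl
          (fun output p =>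
            let x := s * P + p
            output ++ [if x < total_pages then x else -1])
          output)
      []

-- ===== PRECONDITION & SPEC =====
-- A's (unused) ceil line divides by 4*signature_size, raising ZeroDivisionError when
-- signature_size = 0 (B's ceiling division raises there too); those inputs are excluded.
def Pre_get_page_order (total_pages : Int) (signature_size : Int) : Prop := signature_size ≠ 0
instance (total_pages : Int) (signature_size : Int) : Decidable (Pre_get_page_order total_pages signature_size) := by unfold Pre_get_page_order; infer_instance

def pvWitness_get_page_order : Int × Int := (9, 2)

def Spec_get_page_order (total_pages : Int) (signature_size : Int) (out : List Int) : Prop := out = get_page_order_alt total_pages signature_size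
instance (total_pages : Int) (signature_size : Int) (out : List Int) : Decidable (Spec_get_page_order total_pages signature_size out) := by unfold Spec_get_page_order; infer_instance

-- ===== CLAIM (what is proved, stated in full; the proofs are below) =====
def Claim_equal_get_page_order : Prop := ∀ (total_pages : Int) (signature_size : Int), Dom_get_page_order total_pages signature_size → Pre_get_page_order total_pages signature_size → Spec_get_page_order total_pages signature_size (get_page_order total_pages signature_size)

-- ===== LEMMAS AND PROOFS =====

-- the pages one signature contributes, as A's two pointers produce them
def chunkA : Int → Int → Nat → List Int
  | _, _, 0 => []
  | tp, bp, n + 1 => tp :: bp :: (bp + 1) :: (tp - 1) :: chunkA (tp - 2) (bp + 2) n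

lemma innerA (l : List Int) (out : List Int) (tp bp : Int) :
    l.foldl stepA (out, tp, bp) =
      (out ++ chunkA tp bp l.length, tp - 2 * l.length, bp + 2 * l.length) := by
  induction l generalizing out tp bp with
  | nil => simp [chunkA]
  | cons x xs ih =>
    simp only [List.foldl_cons, stepA, List.length_cons]
    rw [ih]
    have e1 : tp - 1 - 1 = tp - 2 := by ring
    have e2 : bp + 1 + 1 = bp + 2 := by ring
    rw [e1, e2]
    simp only [Prod.mk.injEq]
    refine ⟨?_, ?_, ?_⟩
    · simp [chunkA]
    · push_cast; ring
    · push_cast; ring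

lemma chunkA_eq_flat : ∀ (n : Nat) (tp bp : Int), chunkA tp bp n =
    (List.range n).flatMap (fun (i : Nat) => [tp - 2 * (i : Int), bp + 2 * i, bp + 2 * i + 1, tp - 1 - 2 * i])
  | 0, _, _ => by simp [chunkA]
  | n + 1, tp, bp => by
    rw [List.range_succ_eq_map, List.flatMap_cons, List.flatMap_map, chunkA,
      chunkA_eq_flat n (tp - 2) (bp + 2)]
    simp only [List.cons_append, List.nil_append, List.cons.injEq]
    refine ⟨by push_cast; ring, by push_cast; ring, by push_cast; ring, by push_cast; ring, ?_⟩
    congr 1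
    funext i
    push_cast
    simp only [List.cons.injEq, and_true]
    refine ⟨by ring, by ring, by ring, by ring⟩

lemma chunkA_shift_ite (tp c : Int) (n : Nat) : ∀ (a b : Int),
    (chunkA a b n).map (fun p => if c + p < tp then c + p else -1) =
      (chunkA (c + a) (c + b) n).map (fun x => if x < tp then x else -1) := by
  induction n with
  | zero => intro a b; simp [chunkA]
  | succ n ih =>
    intro a b
    have e1 : c + (b + 1) = c + b + 1 := by ring
    have e2 : c + (a - 1) = c + a - 1 := by ring
    have e3 : c + (a - 2) = c + a - 2 := by ring
    have e4 : c + (b + 2) = c + b + 2 := by ring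
    simp only [chunkA, List.map_cons]
    rw [ih (a - 2) (b + 2), e1, e2, e3, e4]

lemma sigcount (tp P : Int) (hP : 0 < P) :
    (if 0 < tp then ((tp + P - 1) / P).toNat else 0) = (-(PySem.Int.floordiv (-tp) P)).toNat := by
  by_cases h : 0 < tp
  · have hq : -(PySem.Int.floordiv (-tp) P) = (tp + P - 1) / P := by
      rw [PySem.Int.neg_floordiv_neg_eq_iff_of_pos hP]
      have h1 : P * ((tp + P - 1) / P) + (tp + P - 1) % P = tp + P - 1 :=
        Int.ediv_add_emod (tp + P - 1) P
      have h2 : 0 ≤ (tp + P - 1) % P := Int.emod_nonneg _ (by omega)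
      have h3 : (tp + P - 1) % P < P := Int.emod_lt_of_pos _ hP
      constructor
      · have : ((tp + P - 1) / P - 1) * P = P * ((tp + P - 1) / P) - P := by ring
        linarith
      · have : ((tp + P - 1) / P) * P = P * ((tp + P - 1) / P) := by ring
        linarith
    rw [if_pos h, hq]
  · rw [if_neg h]
    have h1 : 0 ≤ PySem.Int.floordiv (-tp) P := by
      rw [PySem.Int.floordiv_eq_ediv_of_pos hP]
      exact Int.ediv_nonneg (by omega) (by omega)
    omega

lemma sig_pos (tp P : Int) (hP : 0 < P) (htp : 0 < tp) :
    0 < -(PySem.Int.floordiv (-tp) P) := by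
  have h : PySem.Int.floordiv (-tp) P < 0 := by
    rw [PySem.Int.floordiv_lt_iff_lt_mul hP]
    omega
  omega

lemma sig_nonpos (tp P : Int) (hP : 0 < P) (htp : ¬ 0 < tp) :
    0 ≤ PySem.Int.floordiv (-tp) P := by
  rw [PySem.Int.le_floordiv_iff_mul_le hP]
  omega

-- ===== VERDICT (by name: the statement is the Claim_ definition above) =====
theorem get_page_order_spec : Claim_equal_get_page_order := by
  unfold Claim_equal_get_page_order
  intro tp s _hdom hpre
  unfold Pre_get_page_order at hpre
  unfold Spec_get_page_order
  by_cases hs : s ≤ 0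
  · -- signature_size < 0: both programs emit nothing
    have hnil : PySem.List.pyRange 0 s 1 = [] := PySem.List.pyRange_one_eq_nil hs
    simp [get_page_order, get_page_order_alt, hnil, hs]
  · -- signature_size > 0
    push_neg at hs
    have hP : 0 < s * 4 := by omega
    by_cases htp : 0 < tp
    · have hsig : 0 < -(PySem.Int.floordiv (-tp) (s * 4)) := sig_pos tp (s * 4) hP htp
      have hcond : ¬ (s ≤ 0 ∨ -(PySem.Int.floordiv (-tp) (s * 4)) ≤ 0) := by omega
      -- A's side: per-signature chunks
      have hA : get_page_order tp s =
          ((PySem.List.pyRange 0 tp (s * 4)).flatMap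
            (fun off => chunkA (off + s * 4 - 1) off s.toNat)).map
            (fun x => if x < tp then x else -1) := by
        simp only [get_page_order, innerA, PySem.List.length_pyRange_one, sub_zero,
          PySem.List.foldl_append_eq_flatMap, List.nil_append]
      -- B's pattern is chunkA (P-1) 0 s.toNat
      have hpat : (PySem.List.pyRange 0 s 1).foldl
          (fun acc i => acc ++ [s * 4 - 1 - 2 * i, 2 * i, 2 * i + 1, s * 4 - 2 - 2 * i]) [] =
          chunkA (s * 4 - 1) 0 s.toNat := by
        rw [PySem.List.foldl_append_eq_flatMap, List.nil_append, PySem.List.pyRange_one,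
          List.flatMap_map, chunkA_eq_flat]
        simp only [sub_zero]
        congr 1
        funext i
        simp only [zero_add, List.cons.injEq, and_true, true_and]
        omega
      have hB : get_page_order_alt tp s =
          (PySem.List.pyRange 0 (-(PySem.Int.floordiv (-tp) (s * 4))) 1).flatMap
            (fun sp => (chunkA (s * 4 - 1) 0 s.toNat).map
              (fun p => if sp * (s * 4) + p < tp then sp * (s * 4) + p else -1)) := by
        simp only [get_page_order_alt, if_neg hcond, hpat,
          PySem.List.foldl_append_singleton_eq_map,
          PySem.List.foldl_append_eq_flatMap, List.nil_append]
      rw [hA, hB, PySem.List.pyRange_of_pos 0 tp hP, PySem.List.pyRange_one]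
      simp only [sub_zero, zero_add]
      rw [List.flatMap_map, List.flatMap_map, List.map_flatMap, ← sigcount tp (s * 4) hP]
      congr 1
      funext k
      rw [chunkA_shift_ite tp ((k : Int) * (s * 4)) s.toNat]
      rw [show (k : Int) * (s * 4) + (s * 4 - 1) = s * 4 * (k : Int) + s * 4 - 1 from by ring,
        show (k : Int) * (s * 4) + 0 = s * 4 * (k : Int) from by ring]
    · -- no pages: A's stepped range is empty, B's signature count is ≤ 0
      have hsig : 0 ≤ PySem.Int.floordiv (-tp) (s * 4) := sig_nonpos tp (s * 4) hP htp
      have hcond : s ≤ 0 ∨ -(PySem.Int.floordiv (-tp) (s * 4)) ≤ 0 := Or.inr (by omega)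
      have hBnil : get_page_order_alt tp s = [] := by
        simp only [get_page_order_alt]
        rw [if_pos hcond]
      have hAnil : get_page_order tp s = [] := by
        simp [get_page_order, PySem.List.pyRange_of_pos 0 tp hP, htp]
      rw [hAnil, hBnil]
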